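-- pv_equiv track=rewrite | github.com/Rhettoric74/GridironFootball | scripts/dice_game.py | check_for_doubles
-- ===== SOURCE A (Python) =====
-- def check_for_doubles(rolls):
--     """returns a number if the given list of rolls contains "triples".
--     Returns negative 1 if there are no triples in the list."""
--     counts = {}
--     for roll in rolls:
--         if roll not in counts:
--             counts[roll] = 1
--         else:
--             counts[roll] += 1
--     for number, count in counts.items():
--         if count == 2:
--             return number
--     return -1
-- ===== SOURCE B (Python) =====
-- def check_for_doubles(rolls):
--     """returns a number if the given list of rolls contains "triples".
--     Returns negative 1 if there are no triples in the list."""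
--     for roll in rolls:
--         if rolls.count(roll) == 2:
--             return roll
--     return -1
-- ===== Notes on version B (the rewrite author's own statement) =====
-- stated objective: simpler
-- what changed: Replaced the counts-dictionary pass plus dict-items scan with a direct scan of the list that calls rolls.count(roll) and returns the first element occurring exactly twice.
import Mathlib
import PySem

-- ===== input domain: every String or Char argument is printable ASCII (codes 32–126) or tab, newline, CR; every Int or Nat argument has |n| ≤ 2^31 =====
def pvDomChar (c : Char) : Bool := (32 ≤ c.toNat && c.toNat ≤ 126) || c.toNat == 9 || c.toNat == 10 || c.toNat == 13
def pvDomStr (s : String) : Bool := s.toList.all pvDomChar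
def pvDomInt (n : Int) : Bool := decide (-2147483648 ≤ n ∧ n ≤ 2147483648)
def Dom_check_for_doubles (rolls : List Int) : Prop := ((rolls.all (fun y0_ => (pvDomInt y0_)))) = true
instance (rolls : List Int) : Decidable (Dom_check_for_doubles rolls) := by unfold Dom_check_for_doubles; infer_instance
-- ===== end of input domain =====

-- B replaces A's counts-dictionary pass + dict-items scan by a direct scan of the list
-- returning the first element whose rolls.count is exactly 2 (simpler; not faster).

-- ===== PORT A =====
-- first loop body: if roll not in counts: counts[roll] = 1 else: counts[roll] += 1
-- (in the else branch the key is present, so counts[roll] is exactly d.getD roll 0)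
def cfdStep (d : PySem.Dict Int Int) (roll : Int) : PySem.Dict Int Int :=
  if d.contains roll = false then d.insert roll 1
  else d.insert roll (d.getD roll 0 + 1)

-- second loop: for number, count in counts.items(): if count == 2: return number / return -1
def cfdScan : List (Int × Int) → Int
  | [] => -1
  | (number, count) :: rest => if count = 2 then number else cfdScan rest

def check_for_doubles (rolls : List Int) : Int :=
  cfdScan (rolls.foldl cfdStep PySem.Dict.empty).items

-- ===== PORT B =====
-- for roll in rolls: if rolls.count(roll) == 2: return roll / return -1
def cfdFind (rolls : List Int) : List Int → Int
  | [] => -1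
  | roll :: rest => if PySem.List.count rolls roll = 2 then roll else cfdFind rolls rest

def check_for_doubles_alt (rolls : List Int) : Int := cfdFind rolls rolls

-- ===== PRECONDITION & SPEC =====
def Spec_check_for_doubles (rolls : List Int) (out : Int) : Prop := out = check_for_doubles_alt rolls
instance (rolls : List Int) (out : Int) : Decidable (Spec_check_for_doubles rolls out) := by unfold Spec_check_for_doubles; infer_instance

-- ===== CLAIM (what is proved, stated in full; the proofs are below) =====
def Claim_equal_check_for_doubles : Prop := ∀ (rolls : List Int), Dom_check_for_doubles rolls → Spec_check_for_doubles rolls (check_for_doubles rolls)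

-- ===== LEMMAS AND PROOFS =====

-- A's loop body is the counter step
theorem cfdStep_eq (d : PySem.Dict Int Int) (roll : Int) :
    cfdStep d roll = d.insert roll (d.getD roll 0 + 1) := by
  unfold cfdStep
  by_cases h : d.contains roll = false
  · rw [if_pos h, PySem.Dict.getD_of_not_contains d 0 h]; norm_num
  · rw [if_neg h]

theorem cfdFold_aux (l : List Int) : ∀ d : PySem.Dict Int Int,
    l.foldl cfdStep d = l.foldl (fun d x => d.insert x (d.getD x 0 + 1)) d := by
  induction l with
  | nil => intro d; rfl
  | cons x t ih => intro d; simp only [List.foldl_cons, cfdStep_eq, ih]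

theorem cfdFold_eq_counter (rolls : List Int) :
    rolls.foldl cfdStep PySem.Dict.empty = PySem.Dict.counter rolls := by
  rw [cfdFold_aux, PySem.Dict.foldl_insert_getD_add_one_eq_counter]

-- scanning the (key, count) pairs is scanning the keys with the count predicate
theorem cfdScan_map (rolls : List Int) (l : List Int) :
    cfdScan (l.map (fun k => (k, (List.count k rolls : Int)))) = cfdFind rolls l := by
  induction l with
  | nil => rfl
  | cons k t ih =>
      simp only [List.map_cons, cfdScan, cfdFind, PySem.List.count_eq, ih]
      by_cases h : List.count k rolls = 2
      · rw [if_pos (by exact_mod_cast h), if_pos h]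
      · rw [if_neg (by exact_mod_cast h), if_neg h]

theorem cfdFind_discard (rolls : List Int) (x : Int)
    (hx : ¬ (PySem.List.count rolls x = 2)) :
    ∀ s : List Int, cfdFind rolls (PySem.Set.discard s x) = cfdFind rolls s := by
  intro s
  induction s with
  | nil => rfl
  | cons y t ih =>
      simp only [PySem.Set.discard, List.filter_cons] at ih ⊢
      by_cases hxy : y = x
      · subst hxy
        rw [if_neg (by simp)]
        rw [ih, cfdFind, if_neg hx]
      · rw [if_pos (by simp [hxy])]
        simp only [cfdFind, ih]

theorem cfdFind_ofList (rolls : List Int) (l : List Int) :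
    cfdFind rolls (PySem.Set.ofList l) = cfdFind rolls l := by
  induction l with
  | nil => rfl
  | cons x t ih =>
      rw [PySem.Set.ofList_cons]
      by_cases h : PySem.List.count rolls x = 2
      · simp only [cfdFind, if_pos h]
      · simp only [cfdFind, if_neg h]
        rw [cfdFind_discard rolls x h, ih]

-- ===== VERDICT (by name: the statement is the Claim_ definition above) =====
theorem check_for_doubles_spec : Claim_equal_check_for_doubles := by
  intro rolls _
  show check_for_doubles rolls = check_for_doubles_alt rolls
  unfold check_for_doubles check_for_doubles_alt
  rw [cfdFold_eq_counter, PySem.Dict.items_counter, cfdScan_map, cfdFind_ofList]
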